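-- pv_equiv track=rewrite | github.com/misha-met/Corpus | src/citation_verification.py | _best_density_window
-- ===== SOURCE A (Python) =====
-- from typing import Optional
--
-- def _best_density_window(
--     hits: list[tuple[int, str]],
--     window_size: int = 600,
-- ) -> Optional[tuple[int, int, int]]:
--     """Slide a window across hit positions, find max unique-stem density.
--
--     Returns ``(window_start, window_end, unique_stem_count)`` or None if
--     fewer than 3 unique stems found in any window.
--     """
--     if not hits:
--         return None
--
--     best_start = 0
--     best_end = 0
--     best_count = 0
--
--     positions = [h[0] for h in hits]
--     stems_at = [h[1] for h in hits]
--
--     # Sliding window using two pointers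
--     left = 0
--     stem_counts: dict[str, int] = {}
--     unique_count = 0
--
--     for right in range(len(hits)):
--         # Add right element
--         s = stems_at[right]
--         stem_counts[s] = stem_counts.get(s, 0) + 1
--         if stem_counts[s] == 1:
--             unique_count += 1
--
--         # Shrink window from left if too wide
--         while positions[right] - positions[left] > window_size:
--             ls = stems_at[left]
--             stem_counts[ls] -= 1
--             if stem_counts[ls] == 0:
--                 unique_count -= 1
--                 del stem_counts[ls]
--             left += 1
--
--         if unique_count > best_count:
--             best_count = unique_count
--             best_start = positions[left]
--             best_end = positions[right]
--
--     if best_count < 3: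
--         return None
--
--     return (best_start, best_end, best_count)
-- ===== SOURCE B (Python) =====
-- from typing import Optional
--
--
-- def _best_density_window(
--     hits: list[tuple[int, str]],
--     window_size: int = 600,
-- ) -> Optional[tuple[int, int, int]]:
--     """Two staged passes instead of A's one-pass incremental bookkeeping:
--     first materialize one (count, start, end) candidate per right endpoint,
--     recounting each window's unique stems with a set; then select the first
--     maximum-count candidate with max(key=...)."""
--     if not hits:
--         return None
--
--     positions = [h[0] for h in hits]
--     stems_at = [h[1] for h in hits]
--
--     candidates = []
--     left = 0
--     for right in range(len(hits)):
--         while positions[right] - positions[left] > window_size: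
--             left += 1
--         count = len(set(stems_at[left:right + 1]))
--         candidates.append((count, positions[left], positions[right]))
--
--     count, start, end = max(candidates, key=lambda c: c[0])
--     if count < 3:
--         return None
--     return (start, end, count)
-- ===== Notes on version B (the rewrite author's own statement) =====
-- stated objective: alternative
-- what changed: B replaces A's one-pass incremental stem-count dictionary and running-best bookkeeping by two staged passes: it first materializes a (count, start, end) candidate per right endpoint, recounting each window's unique stems directly with len(set(...)), then selects the first maximum-count candidate with max(key=...).
import Mathlib
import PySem

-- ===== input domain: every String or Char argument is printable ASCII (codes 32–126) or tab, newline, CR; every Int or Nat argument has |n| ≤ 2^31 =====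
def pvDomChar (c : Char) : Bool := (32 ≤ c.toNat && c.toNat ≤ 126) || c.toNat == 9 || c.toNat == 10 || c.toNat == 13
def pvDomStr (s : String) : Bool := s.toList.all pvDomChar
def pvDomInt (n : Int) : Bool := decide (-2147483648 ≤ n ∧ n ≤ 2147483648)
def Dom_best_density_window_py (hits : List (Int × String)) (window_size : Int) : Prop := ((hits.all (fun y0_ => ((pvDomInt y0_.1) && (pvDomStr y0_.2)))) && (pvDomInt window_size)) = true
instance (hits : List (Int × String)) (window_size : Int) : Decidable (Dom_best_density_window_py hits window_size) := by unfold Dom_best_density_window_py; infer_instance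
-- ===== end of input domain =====

-- B replaces A's one-pass incremental stem-count dict and running-best bookkeeping by two staged
-- passes: materialize one (count, start, end) candidate per right endpoint (recounting each
-- window's unique stems with a set), then select the first maximum-count candidate (objective: alternative).

-- ===== PORT A =====
-- the inner 'while positions[right] - positions[left] > window_size' loop of A; fuel bounds the
-- number of steps (inside Pre_ the loop runs at most 'right - left ≤ fuel' times); list indexing
-- positions[left] / stems_at[left] is via getD (indices stay in range inside Pre_)
def shrinkA (positions : List Int) (stems : List String) (ws pr : Int) :
    Nat → Nat × PySem.Dict String Int × Int → Nat × PySem.Dict String Int × Int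
  | 0, st => st
  | fuel + 1, (left, sc, uc) =>
    if pr - positions.getD left 0 > ws then
      let ls := stems.getD left ""
      let c := sc.getD ls 0 - 1
      let sc1 := sc.insert ls c
      if c == 0 then shrinkA positions stems ws pr fuel (left + 1, sc1.erase ls, uc - 1)
      else shrinkA positions stems ws pr fuel (left + 1, sc1, uc)
    else (left, sc, uc)

-- one iteration of A's 'for right in range(len(hits))' loop; state = (left, stem_counts, unique_count, best_start, best_end, best_count)
def stepA (positions : List Int) (stems : List String) (ws : Int) (n : Nat)
    (st : Nat × PySem.Dict String Int × Int × Int × Int × Int) (right : Nat) :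
    Nat × PySem.Dict String Int × Int × Int × Int × Int :=
  match st with
  | (left, sc, uc, bs, be, bc) =>
    let s := stems.getD right ""
    let sc1 := sc.insert s (sc.getD s 0 + 1)
    let uc1 := if sc1.getD s 0 == 1 then uc + 1 else uc
    match shrinkA positions stems ws (positions.getD right 0) n (left, sc1, uc1) with
    | (left2, sc2, uc2) =>
      if uc2 > bc then (left2, sc2, uc2, positions.getD left2 0, positions.getD right 0, uc2)
      else (left2, sc2, uc2, bs, be, bc)

def best_density_window_py (hits : List (Int × String)) (window_size : Int) : Option (Int × Int × Int) :=
  if hits.isEmpty then none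
  else
    let positions := hits.map Prod.fst
    let stems := hits.map Prod.snd
    match (List.range hits.length).foldl (stepA positions stems window_size hits.length)
        (0, PySem.Dict.empty, 0, 0, 0, 0) with
    | (_, _, _, bs, be, bc) => if bc < 3 then none else some (bs, be, bc)

-- ===== PORT B =====
-- B's copy of the left-pointer while loop, advancing left only
def shrinkB (positions : List Int) (ws pr : Int) : Nat → Nat → Nat
  | 0, left => left
  | fuel + 1, left =>
    if pr - positions.getD left 0 > ws then shrinkB positions ws pr fuel (left + 1) else left

-- B's first pass: the list of (count, start, end) candidates for rights right, right+1, …, n-1;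
-- 'len(set(stems_at[left:right+1]))' is ported as the slice (drop/take) fed to PySem.Set.ofList
def candsB (positions : List Int) (stems : List String) (ws : Int) (n : Nat)
    (left right : Nat) : List (Int × Int × Int) :=
  if h : right < n then
    let left2 := shrinkB positions ws (positions.getD right 0) n left
    let cnt : Int := (PySem.Set.ofList ((stems.drop left2).take (right + 1 - left2))).length
    (cnt, positions.getD left2 0, positions.getD right 0) ::
      candsB positions stems ws n left2 (right + 1)
  else []
termination_by n - right

-- B's second pass is max(candidates, key=lambda c: c[0]) = PySem.List.max? (first extremal);
-- the candidate list is nonempty whenever hits is, so the 'none' arm is unreachable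
def best_density_window_py_alt (hits : List (Int × String)) (window_size : Int) : Option (Int × Int × Int) :=
  if hits.isEmpty then none
  else
    let positions := hits.map Prod.fst
    let stems := hits.map Prod.snd
    match PySem.List.max? (candsB positions stems window_size hits.length 0 0)
        (fun c => c.1) with
    | none => none
    | some (cnt, st, en) => if cnt < 3 then none else some (st, en, cnt)

-- ===== PRECONDITION & SPEC =====
-- Pre_ excludes only inputs where A raises: for nonempty hits and negative window_size the inner
-- while loop always drives the left pointer past the last index (0 > window_size holds at
-- left = right), so A ends in IndexError or KeyError there; B raises likewise.
def Pre_best_density_window_py (hits : List (Int × String)) (window_size : Int) : Prop :=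
  hits = [] ∨ 0 ≤ window_size
instance (hits : List (Int × String)) (window_size : Int) : Decidable (Pre_best_density_window_py hits window_size) := by unfold Pre_best_density_window_py; infer_instance

def pvWitness_best_density_window_py : (List (Int × String)) × Int :=
  ([(0, "a"), (1, "b"), (2, "c")], 600)

def Spec_best_density_window_py (hits : List (Int × String)) (window_size : Int) (out : Option (Int × Int × Int)) : Prop := out = best_density_window_py_alt hits window_size
instance (hits : List (Int × String)) (window_size : Int) (out : Option (Int × Int × Int)) : Decidable (Spec_best_density_window_py hits window_size out) := by unfold Spec_best_density_window_py; infer_instance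

-- ===== CLAIM (what is proved, stated in full; the proofs are below) =====
def Claim_equal_best_density_window_py : Prop := ∀ (hits : List (Int × String)) (window_size : Int), Dom_best_density_window_py hits window_size → Pre_best_density_window_py hits window_size → Spec_best_density_window_py hits window_size (best_density_window_py hits window_size)

-- ===== LEMMAS AND PROOFS =====

-- the window stems[l:r] as a list
def pvWin (stems : List String) (l r : Nat) : List String := (stems.drop l).take (r - l)

lemma pvWin_zero (stems : List String) (l : Nat) : pvWin stems l l = [] := by
  simp [pvWin]

lemma pvWin_snoc (stems : List String) (l k : Nat) (hlk : l ≤ k) (hk : k < stems.length) :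
    pvWin stems l (k + 1) = pvWin stems l k ++ [stems.getD k ""] := by
  unfold pvWin
  have h1 : k + 1 - l = (k - l) + 1 := by omega
  rw [h1, List.take_add_one]
  have h2 : (stems.drop l)[k - l]? = stems[k]? := by
    rw [List.getElem?_drop]; congr 1; omega
  rw [h2, List.getElem?_eq_getElem hk]
  simp [List.getD, List.getElem?_eq_getElem hk]

lemma pvWin_cons (stems : List String) (l r : Nat) (hlr : l < r) (hl : l < stems.length) :
    pvWin stems l r = stems.getD l "" :: pvWin stems (l + 1) r := by
  unfold pvWin
  rw [List.drop_eq_getElem_cons hl]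
  have h1 : r - l = (r - (l + 1)) + 1 := by omega
  rw [h1, List.take_succ_cons]
  simp [List.getD, List.getElem?_eq_getElem hl]

-- len(set(L)) is the number of distinct elements
lemma pvSetLen (L : List String) : (PySem.Set.ofList L).length = L.toFinset.card := by
  have htf : (PySem.Set.ofList L).toFinset = L.toFinset := by
    ext x; simp [List.mem_toFinset, PySem.Set.mem_ofList]
  rw [← htf, List.toFinset_card_of_nodup (PySem.Set.nodup_ofList L)]

lemma pvCardSnoc (L : List String) (s : String) :
    ((L ++ [s]).toFinset.card : Int) =
      (L.toFinset.card : Int) + (if s ∈ L then 0 else 1) := by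
  by_cases h : s ∈ L
  · simp [h, List.toFinset_append, Finset.insert_eq_self.mpr (List.mem_toFinset.mpr h)]
  · simp [List.toFinset_append, h,
      Finset.card_insert_of_notMem (fun hc => h (List.mem_toFinset.mp hc))]

lemma pvCardCons (x : String) (L : List String) :
    ((x :: L).toFinset.card : Int) =
      (L.toFinset.card : Int) + (if x ∈ L then 0 else 1) := by
  by_cases h : x ∈ L
  · simp [h, Finset.insert_eq_self.mpr (List.mem_toFinset.mpr h)]
  · simp [h, Finset.card_insert_of_notMem (fun hc => h (List.mem_toFinset.mp hc))]

lemma pvGet?_erase {κ ν : Type} [BEq κ] [LawfulBEq κ] (d : PySem.Dict κ ν) (k k' : κ) :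
    (d.erase k).get? k' = if k' == k then none else d.get? k' := by
  obtain ⟨items⟩ := d
  simp only [PySem.Dict.erase, PySem.Dict.get?]
  by_cases hk : k' = k
  · subst hk
    have hnone : List.find? (fun p => p.1 == k') (List.filter (fun p : κ × ν => !p.1 == k') items) = none := by
      apply List.find?_eq_none.mpr
      intro a ha
      have h2 := List.of_mem_filter ha
      simpa using h2
    simp [hnone]
  · rw [if_neg (by simpa using hk)]
    induction items with
    | nil => rfl
    | cons p t ih =>
      rw [List.filter_cons]
      by_cases hp : p.1 = k
      · have h1 : (p.1 == k') = false := by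
          refine beq_eq_false_iff_ne.mpr ?_
          intro h; exact hk (by rw [← h, hp])
        rw [if_neg (by simp [hp])]
        simp only [List.find?_cons, h1]
        exact ih
      · rw [if_pos (by simp [hp])]
        by_cases hp' : p.1 = k'
        · have h1 : (p.1 == k') = true := beq_iff_eq.mpr hp'
          simp only [List.find?_cons, h1]
        · have h1 : (p.1 == k') = false := beq_eq_false_iff_ne.mpr hp'
          simp only [List.find?_cons, h1]
          exact ih

lemma pvGetD_erase {κ ν : Type} [BEq κ] [LawfulBEq κ] (d : PySem.Dict κ ν) (k k' : κ) (d0 : ν) :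
    (d.erase k).getD k' d0 = if k' == k then d0 else d.getD k' d0 := by
  simp only [PySem.Dict.getD, pvGet?_erase]
  by_cases h : (k' == k) = true <;> simp [h]

-- the coupled invariant carried through the loops:
-- the dict holds the multiset of the current window, uc its number of distinct stems
def pvInv (sc : PySem.Dict String Int) (uc : Int) (W : List String) : Prop :=
  (∀ s, sc.getD s 0 = (W.count s : Int)) ∧ uc = (W.toFinset.card : Int)

lemma pvShrink_spec (positions : List Int) (stems : List String) (ws pr : Int) (hws : 0 ≤ ws)
    (R : Nat) (hR : R < stems.length) (hpr : pr = positions.getD R 0) :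
    ∀ fuel left sc uc, left ≤ R → R - left < fuel →
      pvInv sc uc (pvWin stems left (R + 1)) →
      ∃ left2 sc2 uc2,
        shrinkA positions stems ws pr fuel (left, sc, uc) = (left2, sc2, uc2) ∧
        shrinkB positions ws pr fuel left = left2 ∧
        left2 ≤ R ∧
        pvInv sc2 uc2 (pvWin stems left2 (R + 1)) := by
  intro fuel
  induction fuel with
  | zero => intro left sc uc h1 h2 _; exact absurd h2 (by omega)
  | succ f ih =>
    intro left sc uc hleft hfuel hinv
    by_cases hc : pr - positions.getD left 0 > ws
    · -- loop body runs; left < R since at left = R the condition is 0 > ws, false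
      have hlR : left < R := by
        by_contra h
        have he : left = R := by omega
        subst he
        rw [hpr] at hc; omega
      have hl : left < stems.length := by omega
      have hW : pvWin stems left (R + 1) = stems.getD left "" :: pvWin stems (left + 1) (R + 1) :=
        pvWin_cons stems left (R + 1) (by omega) hl
      obtain ⟨hcount, hcard⟩ := hinv
      have hcx : sc.getD (stems.getD left "") 0 - 1
          = ((pvWin stems (left + 1) (R + 1)).count (stems.getD left "") : Int) := by
        rw [hcount, hW, List.count_cons_self]; push_cast; ring
      have hcount1 : ∀ s,
          (sc.insert (stems.getD left "") (sc.getD (stems.getD left "") 0 - 1)).getD s 0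
            = ((pvWin stems (left + 1) (R + 1)).count s : Int) := by
        intro s
        rw [PySem.Dict.getD_insert]
        by_cases hs : s = stems.getD left ""
        · rw [if_pos hs, hs]; exact hcx
        · rw [if_neg hs, hcount, hW, List.count_cons_of_ne (Ne.symm hs)]
      have hBstep : shrinkB positions ws pr (f + 1) left = shrinkB positions ws pr f (left + 1) := by
        simp only [shrinkB, if_pos hc]
      by_cases hz : sc.getD (stems.getD left "") 0 - 1 = 0
      · -- the stem leaves the window entirely
        have hxW' : stems.getD left "" ∉ pvWin stems (left + 1) (R + 1) := by
          apply List.count_eq_zero.mp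
          have h := hcx; rw [hz] at h; exact_mod_cast h.symm
        have hAstep : shrinkA positions stems ws pr (f + 1) (left, sc, uc) =
            shrinkA positions stems ws pr f
              (left + 1,
               (sc.insert (stems.getD left "") (sc.getD (stems.getD left "") 0 - 1)).erase
                 (stems.getD left ""), uc - 1) := by
          simp only [shrinkA, if_pos hc, hz, beq_self_eq_true, if_true]
        obtain ⟨l2, s2, u2, hA', hB', hl2, hinv2⟩ :=
          ih (left + 1)
            ((sc.insert (stems.getD left "") (sc.getD (stems.getD left "") 0 - 1)).erase
              (stems.getD left "")) (uc - 1) (by omega) (by omega)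
            ⟨fun s => by
                rw [pvGetD_erase]
                by_cases hs : s = stems.getD left ""
                · rw [if_pos (beq_iff_eq.mpr hs), hs, List.count_eq_zero.mpr hxW']; rfl
                · rw [if_neg (by simpa using hs)]; exact hcount1 s,
              by rw [hcard, hW, pvCardCons, if_neg hxW']; ring⟩
        exact ⟨l2, s2, u2, by rw [hAstep, hA'], by rw [hBstep, hB'], hl2, hinv2⟩
      · -- the stem still occurs in the shrunk window
        have hxW' : stems.getD left "" ∈ pvWin stems (left + 1) (R + 1) := by
          by_contra hn'
          apply hz
          rw [hcx, List.count_eq_zero.mpr hn']; rfl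
        have hAstep : shrinkA positions stems ws pr (f + 1) (left, sc, uc) =
            shrinkA positions stems ws pr f
              (left + 1, sc.insert (stems.getD left "") (sc.getD (stems.getD left "") 0 - 1), uc) := by
          simp only [shrinkA, if_pos hc]
          rw [if_neg (by simpa using hz)]
        obtain ⟨l2, s2, u2, hA', hB', hl2, hinv2⟩ :=
          ih (left + 1) (sc.insert (stems.getD left "") (sc.getD (stems.getD left "") 0 - 1)) uc
            (by omega) (by omega)
            ⟨hcount1, by rw [hcard, hW, pvCardCons, if_pos hxW']; ring⟩
        exact ⟨l2, s2, u2, by rw [hAstep, hA'], by rw [hBstep, hB'], hl2, hinv2⟩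
    · -- condition false: both loops stop
      exact ⟨left, sc, uc, by simp only [shrinkA, if_neg hc], by simp only [shrinkB, if_neg hc],
        hleft, hinv⟩

-- one A-iteration, expressed against B's shrinkB and window recount
lemma pvStep_spec (positions : List Int) (stems : List String) (ws : Int) (hws : 0 ≤ ws)
    (n : Nat) (hn : stems.length = n) (k : Nat) (hk : k < n)
    (left : Nat) (sc : PySem.Dict String Int) (uc bs be bc : Int)
    (hlk : left ≤ k) (hinv : pvInv sc uc (pvWin stems left k)) :
    ∃ left2 sc2 uc2,
      stepA positions stems ws n (left, sc, uc, bs, be, bc) k =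
        (left2, sc2, uc2,
         if uc2 > bc then (positions.getD left2 0, positions.getD k 0, uc2) else (bs, be, bc)) ∧
      left2 = shrinkB positions ws (positions.getD k 0) n left ∧
      left2 ≤ k + 1 ∧
      pvInv sc2 uc2 (pvWin stems left2 (k + 1)) ∧
      ((PySem.Set.ofList ((stems.drop left2).take (k + 1 - left2))).length : Int) = uc2 := by
  obtain ⟨hcount, hcard⟩ := hinv
  have hkl : k < stems.length := by omega
  have hW1 : pvWin stems left (k + 1) = pvWin stems left k ++ [stems.getD k ""] :=
    pvWin_snoc stems left k hlk hkl
  have hcount1 : ∀ t,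
      (sc.insert (stems.getD k "") (sc.getD (stems.getD k "") 0 + 1)).getD t 0
        = ((pvWin stems left (k + 1)).count t : Int) := by
    intro t
    rw [PySem.Dict.getD_insert, hW1]
    by_cases ht : t = stems.getD k ""
    · rw [if_pos ht, ht, hcount, List.count_append]; push_cast; simp
    · rw [if_neg ht, hcount, List.count_append]
      have h0 : List.count t [stems.getD k ""] = 0 :=
        List.count_eq_zero.mpr (fun hm => ht (List.mem_singleton.mp hm))
      rw [h0, Nat.add_zero]
  have huc1 : (if (sc.insert (stems.getD k "") (sc.getD (stems.getD k "") 0 + 1)).getD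
        (stems.getD k "") 0 == 1 then uc + 1 else uc)
      = ((pvWin stems left (k + 1)).toFinset.card : Int) := by
    rw [hcount1 (stems.getD k ""), hW1, pvCardSnoc, ← hcard]
    have hc1 : (pvWin stems left k ++ [stems.getD k ""]).count (stems.getD k "")
        = (pvWin stems left k).count (stems.getD k "") + 1 := by
      rw [List.count_append]
      simp
    by_cases hsW : stems.getD k "" ∈ pvWin stems left k
    · have h1 : (((pvWin stems left k ++ [stems.getD k ""]).count (stems.getD k "") : Int) == 1)
          = false := by
        refine beq_eq_false_iff_ne.mpr ?_
        rw [hc1]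
        intro h3
        have h4 : (pvWin stems left k).count (stems.getD k "") + 1 = 1 := by exact_mod_cast h3
        have h5 := List.count_pos_iff.mpr hsW
        omega
      rw [h1, if_neg (by simp), if_pos hsW]; ring
    · have h1 : (((pvWin stems left k ++ [stems.getD k ""]).count (stems.getD k "") : Int) == 1)
          = true := by
        rw [beq_iff_eq, hc1, List.count_eq_zero.mpr hsW]
        norm_num
      rw [h1, if_pos rfl, if_neg hsW]
  obtain ⟨left2, sc2, uc2, hA, hB, hl2, hcount2, hcard2⟩ :=
    pvShrink_spec positions stems ws (positions.getD k 0) hws k hkl rfl n left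
      (sc.insert (stems.getD k "") (sc.getD (stems.getD k "") 0 + 1))
      (if (sc.insert (stems.getD k "") (sc.getD (stems.getD k "") 0 + 1)).getD
          (stems.getD k "") 0 == 1 then uc + 1 else uc)
      hlk (by omega)
      ⟨hcount1, huc1⟩
  refine ⟨left2, sc2, uc2, ?_, hB.symm, by omega, ⟨hcount2, hcard2⟩, ?_⟩
  · unfold stepA
    simp only [hA]
    by_cases hgt : uc2 > bc
    · rw [if_pos hgt, if_pos hgt]
    · rw [if_neg hgt, if_neg hgt]
  · rw [pvSetLen, hcard2]; rfl

-- the (best_count, best_start, best_end) components of A's loop state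
def pvSel (st : Nat × PySem.Dict String Int × Int × Int × Int × Int) : Int × Int × Int :=
  (st.2.2.2.2.2, st.2.2.2.1, st.2.2.2.2.1)

-- the strict running-best fold A performs over the (count, start, end) candidates
def pvBestFold (L : List (Int × Int × Int)) (m : Int × Int × Int) : Int × Int × Int :=
  L.foldl (fun acc c => if c.1 > acc.1 then c else acc) m

-- the remaining A-loop over rights k, k+1, …, n-1 computes the running-best fold of candsB
lemma pvOuter (positions : List Int) (stems : List String) (ws : Int) (hws : 0 ≤ ws)
    (n : Nat) (hn : stems.length = n) :
    ∀ fuel k left sc uc (bs be bc : Int), k + fuel = n → left ≤ k →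
      pvInv sc uc (pvWin stems left k) →
      pvSel ((List.range' k fuel).foldl (stepA positions stems ws n) (left, sc, uc, bs, be, bc)) =
      pvBestFold (candsB positions stems ws n left k) (bc, bs, be) := by
  intro fuel
  induction fuel with
  | zero =>
    intro k left sc uc bs be bc hkn hlk hinv
    have hk : ¬ k < n := by omega
    rw [candsB, dif_neg hk]
    simp [pvBestFold, pvSel]
  | succ f ih =>
    intro k left sc uc bs be bc hkn hlk hinv
    have hk : k < n := by omega
    obtain ⟨left2, sc2, uc2, hstep, hlB, hl2, hinv2, hcnt⟩ :=
      pvStep_spec positions stems ws hws n hn k hk left sc uc bs be bc hlk hinv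
    rw [candsB, dif_pos hk]
    simp only [List.range'_succ, List.foldl_cons, hstep]
    have hcands : candsB positions stems ws n
        (shrinkB positions ws (positions.getD k 0) n left) (k + 1)
        = candsB positions stems ws n left2 (k + 1) := by rw [hlB]
    by_cases hgt : uc2 > bc
    · rw [if_pos hgt]
      have := ih (k + 1) left2 sc2 uc2 (positions.getD left2 0) (positions.getD k 0) uc2
        (by omega) hl2 hinv2
      rw [this]
      simp only [pvBestFold, List.foldl_cons, ← hlB, hcnt]
      rw [if_pos hgt]
    · rw [if_neg hgt]
      have := ih (k + 1) left2 sc2 uc2 bs be bc (by omega) hl2 hinv2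
      rw [this]
      simp only [pvBestFold, List.foldl_cons, ← hlB, hcnt]
      rw [if_neg hgt]

-- PySem.List.max? with key c.1 on a nonempty list is the strict running-best fold from its head
lemma pvMaxFold : ∀ (t : List (Int × Int × Int)) (c : Int × Int × Int),
    PySem.List.max? (c :: t) (fun x : Int × Int × Int => x.1) = some (pvBestFold t c) := by
  intro t
  induction t with
  | nil => intro c; rfl
  | cons d t' ih =>
    intro c
    have h1 : PySem.List.max? (c :: d :: t') (fun x : Int × Int × Int => x.1)
        = PySem.List.max? ((if c.1 < d.1 then d else c) :: t') (fun x : Int × Int × Int => x.1) := by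
      simp only [PySem.List.max?, List.foldl_cons, apply_ite some]
    rw [h1, ih]
    simp only [pvBestFold, List.foldl_cons]

-- ===== VERDICT (by name: the statement is the Claim_ definition above) =====
theorem best_density_window_py_spec : Claim_equal_best_density_window_py := by
  intro hits ws _ hpre
  unfold Spec_best_density_window_py best_density_window_py best_density_window_py_alt
  by_cases hemp : hits.isEmpty
  · simp [hemp]
  · have hne : hits ≠ [] := by simpa [List.isEmpty_iff] using hemp
    have hws : 0 ≤ ws := by
      rcases hpre with h | h
      · exact absurd h hne
      · exact h
    rw [if_neg hemp, if_neg hemp]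
    obtain ⟨⟨p0, s0⟩, rest, hhits⟩ := List.exists_cons_of_ne_nil hne
    set positions := hits.map Prod.fst with hpos
    set stems := hits.map Prod.snd with hstems
    have hn : stems.length = hits.length := by simp [hstems]
    have hnpos : 0 < hits.length := by simp [hhits]
    -- the A-side fold equals the running-best fold over the candidate list
    have hA := pvOuter positions stems ws hws hits.length hn hits.length 0 0
      PySem.Dict.empty 0 0 0 0 (by omega) (by omega)
      ⟨fun s => by simp [PySem.Dict.getD_empty, pvWin_zero], by simp [pvWin_zero]⟩
    rw [List.range_eq_range']
    show (match (List.range' 0 hits.length).foldl (stepA positions stems ws hits.length)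
          (0, PySem.Dict.empty, 0, 0, 0, 0) with
        | (_, _, _, bs, be, bc) => if bc < 3 then none else some (bs, be, bc)) =
      (match PySem.List.max? (candsB positions stems ws hits.length 0 0)
          (fun c => c.1) with
        | none => none
        | some (cnt, st, en) => if cnt < 3 then none else some (st, en, cnt))
    -- the head candidate: at right = 0 the left pointer stays at 0 and the count is 1
    have hshrink0 : shrinkB positions ws (positions.getD 0 0) hits.length 0 = 0 := by
      obtain ⟨f, hf⟩ : ∃ f, hits.length = f + 1 := ⟨hits.length - 1, by omega⟩
      rw [hf]
      simp only [shrinkB]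
      rw [if_neg (by omega)]
    have hhead : candsB positions stems ws hits.length 0 0
        = (1, positions.getD 0 0, positions.getD 0 0) ::
          candsB positions stems ws hits.length 0 1 := by
      rw [candsB, dif_pos hnpos]
      simp only [hshrink0]
      congr 1
      have hstems0 : stems = s0 :: rest.map Prod.snd := by simp [hstems, hhits]
      rw [hstems0]
      simp [PySem.Set.ofList, PySem.Set.add]
    -- B's max? is the same fold started at the head; the head's count 1 beats A's initial 0
    have hBmax : PySem.List.max? (candsB positions stems ws hits.length 0 0)
          (fun c : Int × Int × Int => c.1)
        = some (pvBestFold (candsB positions stems ws hits.length 0 1)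
            (1, positions.getD 0 0, positions.getD 0 0)) := by
      rw [hhead]
      exact pvMaxFold _ _
    have hA' : pvSel ((List.range' 0 hits.length).foldl (stepA positions stems ws hits.length)
          (0, PySem.Dict.empty, 0, 0, 0, 0))
        = pvBestFold (candsB positions stems ws hits.length 0 1)
            (1, positions.getD 0 0, positions.getD 0 0) := by
      rw [hA, hhead]
      simp only [pvBestFold, List.foldl_cons]
      norm_num
    rw [hBmax]
    generalize hme : pvBestFold (candsB positions stems ws hits.length 0 1)
        (1, positions.getD 0 0, positions.getD 0 0) = m at hA' ⊢
    generalize hAe : (List.range' 0 hits.length).foldl (stepA positions stems ws hits.length)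
        (0, PySem.Dict.empty, 0, 0, 0, 0) = rA at hA' ⊢
    obtain ⟨l, sc, uc, bs, be, bc⟩ := rA
    obtain ⟨c, s, e⟩ := m
    simp only [pvSel] at hA'
    obtain ⟨h1, h2, h3⟩ : bc = c ∧ bs = s ∧ be = e := by
      refine ⟨?_, ?_, ?_⟩ <;> [exact congrArg Prod.fst hA';
        exact congrArg (fun x => x.2.1) hA'; exact congrArg (fun x => x.2.2) hA']
    subst h1 h2 h3
    rfl
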